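-- pv_equiv track=rewrite | github.com/mikhaildubov/Formal-Concept-Analysis | fc_lattice.py | lattice
-- ===== SOURCE A (Python) =====
-- def lattice(concepts):
--     """Computes formal concepts lattice.
--
--     :param concepts: List of concept tuples, as returned by the compute_fc() methods
--     :returns: List of lattice edges, each edge being a pair (C1, C2),
--               where C1 and C2 are concept tuples
--     """
--     concepts_sorted = sorted(concepts, key=lambda x: len(x[0]))
--     edges = []
--     for c1 in concepts_sorted:
--         c1_adj = []
--         for c2 in concepts_sorted:
--             if c1[0] < c2[0]:
--                 for c_adj in c1_adj:
--                     if c_adj[0] < c2[0]: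
--                         break
--                 else:
--                     c1_adj.append(c2)
--         for c2 in c1_adj:
--             edges.append((c1, c2))
--     return edges
-- ===== SOURCE B (Python) =====
-- def lattice(concepts):
--     """Collect-then-minimize, expressed as a nested comprehension: for each
--     concept (in extent-size order) gather its strict supersets, keep the
--     minimal ones, and emit the edges; same edges in same order as A."""
--     order = sorted(concepts, key=lambda c: len(c[0]))
--
--     def covers(c1):
--         sups = [c2 for c2 in order if c1[0] < c2[0]]
--         return [s for s in sups if not any(t[0] < s[0] for t in sups)]
--
--     return [(c1, s) for c1 in order for s in covers(c1)]
-- ===== Notes on version B (the rewrite author's own statement) =====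
-- stated objective: simpler
-- what changed: A maintains a mutable accepted-covers list with an early-break inner scan while appending edges to an accumulator; B is a nested comprehension (flatMap) over a pure helper covers(c1) that first collects all strict supersets and then filters them for minimality, with no mutable state. Pre_ states the set-representation invariant (extent lists are duplicate-free), which every Python input of type set[int] satisfies automatically.
import Mathlib
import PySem

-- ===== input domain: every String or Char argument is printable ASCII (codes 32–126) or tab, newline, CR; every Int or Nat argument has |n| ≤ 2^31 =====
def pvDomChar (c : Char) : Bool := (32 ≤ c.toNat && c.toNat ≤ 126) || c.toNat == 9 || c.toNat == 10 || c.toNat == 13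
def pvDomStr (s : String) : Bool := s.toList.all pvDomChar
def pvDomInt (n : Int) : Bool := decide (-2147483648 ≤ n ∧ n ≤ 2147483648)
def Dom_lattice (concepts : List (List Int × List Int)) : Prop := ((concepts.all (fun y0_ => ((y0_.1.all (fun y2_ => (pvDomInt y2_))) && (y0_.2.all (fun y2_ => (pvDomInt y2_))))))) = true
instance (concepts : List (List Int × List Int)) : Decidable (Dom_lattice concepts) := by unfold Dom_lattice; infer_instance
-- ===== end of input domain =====

-- B replaces A's mutable accepted-covers maintenance (inner scan with early break, edge
-- accumulator) by a nested comprehension over a pure covers helper (collect strict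
-- supersets, then filter for minimality). Return values proved equal; no side effects.

-- ===== PORT A =====
-- Python's `s < t` on set[int] (proper subset) as A spells it, on the distinct-element list representation
def pySetLt (a b : List Int) : Bool :=
  (a.all (fun x => b.contains x)) && !(b.all (fun x => a.contains x))

def lattice (concepts : List (List Int × List Int)) : List ((List Int × List Int) × (List Int × List Int)) :=
  let concepts_sorted := PySem.List.sorted concepts (fun x => x.1.length)
  concepts_sorted.foldl (fun edges c1 =>
    let c1_adj := concepts_sorted.foldl (fun adj c2 =>
      if pySetLt c1.1 c2.1 then
        -- for c_adj in c1_adj: if c_adj[0] < c2[0]: break / else: append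
        if adj.any (fun t => pySetLt t.1 c2.1) then adj else adj ++ [c2]
      else adj) []
    c1_adj.foldl (fun e c2 => e ++ [(c1, c2)]) edges) []

-- ===== PORT B =====
-- proper subset, B's reading: a ⊆ b and b has an element missing from a
def strictSub (a b : List Int) : Bool :=
  a.all (fun x => b.contains x) && b.any (fun y => !a.contains y)

def covers (order : List (List Int × List Int)) (c1 : List Int × List Int) :
    List (List Int × List Int) :=
  let sups := order.filter (fun c2 => strictSub c1.1 c2.1)
  sups.filter (fun s => !(sups.any (fun t => strictSub t.1 s.1)))

def lattice_alt (concepts : List (List Int × List Int)) : List ((List Int × List Int) × (List Int × List Int)) :=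
  let order := PySem.List.sorted concepts (fun c => c.1.length)
  order.flatMap (fun c1 => (covers order c1).map (fun s => (c1, s)))

-- ===== PRECONDITION & SPEC =====
-- Pre_ is the set-representation invariant of the parameter type list[tuple[set[int], set[int]]]:
-- extent lists hold distinct elements. Every actual Python input (a list of pairs of sets)
-- satisfies it; it excludes only List-encodings that do not represent sets.
def Pre_lattice (concepts : List (List Int × List Int)) : Prop :=
  ∀ c ∈ concepts, c.1.Nodup
instance (concepts : List (List Int × List Int)) : Decidable (Pre_lattice concepts) := by unfold Pre_lattice; infer_instance
def pvWitness_lattice : (List (List Int × List Int)) := [([1, 2], [3]), ([1], [3, 4]), ([], [5])]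
def Spec_lattice (concepts : List (List Int × List Int)) (out : List ((List Int × List Int) × (List Int × List Int))) : Prop := out = lattice_alt concepts
instance (concepts : List (List Int × List Int)) (out : List ((List Int × List Int) × (List Int × List Int))) : Decidable (Spec_lattice concepts out) := by unfold Spec_lattice; infer_instance

-- ===== CLAIM (what is proved, stated in full; the proofs are below) =====
def Claim_equal_lattice : Prop := ∀ (concepts : List (List Int × List Int)), Dom_lattice concepts → Pre_lattice concepts → Spec_lattice concepts (lattice concepts)

-- ===== LEMMAS AND PROOFS =====

theorem strictSub_eq (a b : List Int) : strictSub a b = pySetLt a b := by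
  simp only [strictSub, pySetLt]
  congr 1
  induction b with
  | nil => rfl
  | cons x xs ih =>
    simp only [List.any_cons, List.all_cons, Bool.not_and, List.contains_eq_mem] at ih ⊢
    rw [ih]

theorem pySetLt_irrefl (a : List Int) : pySetLt a a = false := by
  simp [pySetLt]

theorem pySetLt_trans {a b c : List Int} (h1 : pySetLt a b = true) (h2 : pySetLt b c = true) :
    pySetLt a c = true := by
  simp only [pySetLt, Bool.and_eq_true, Bool.not_eq_true', List.all_eq_true,
    List.contains_eq_mem, decide_eq_true_eq, List.all_eq_false] at *
  obtain ⟨hab, _⟩ := h1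
  obtain ⟨hbc, ⟨y, hy, hyb⟩⟩ := h2
  exact ⟨fun x hx => hbc _ (hab _ hx), ⟨y, hy, fun hya => hyb (hab _ hya)⟩⟩

theorem pySetLt_length_lt {a b : List Int} (ha : a.Nodup) (h : pySetLt a b = true) :
    a.length < b.length := by
  simp only [pySetLt, Bool.and_eq_true, Bool.not_eq_true', List.all_eq_true,
    List.contains_eq_mem, decide_eq_true_eq, List.all_eq_false] at h
  obtain ⟨hab, ⟨y, hy, hya⟩⟩ := h
  have hss : a.toFinset ⊂ b.toFinset := by
    constructor
    · intro x hx
      simp only [List.mem_toFinset] at *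
      exact hab _ hx
    · intro hsub
      exact hya (by simpa using hsub (by simpa using hy))
  calc a.length = a.toFinset.card := (List.toFinset_card_of_nodup ha).symm
    _ < b.toFinset.card := Finset.card_lt_card hss
    _ ≤ b.length := b.toFinset_card_le

-- the sorted list never has a later element whose extent is a strict subset of an earlier one's
theorem sorted_pairwise_notLt (concepts : List (List Int × List Int))
    (hnd : ∀ c ∈ concepts, c.1.Nodup) :
    (PySem.List.sorted concepts (fun x => x.1.length)).Pairwise
      (fun a b => pySetLt b.1 a.1 = false) := by
  have hp := PySem.List.sorted_pairwise (xs := concepts) (key := fun x => x.1.length)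
  refine List.Pairwise.imp_of_mem (fun {a b} ha hb hle => ?_) hp
  by_contra hlt
  have hlt' : pySetLt b.1 a.1 = true := by
    cases hx : pySetLt b.1 a.1 with
    | false => exact absurd hx hlt
    | true => rfl
  have hbnd : b.1.Nodup := hnd b ((PySem.List.mem_sorted _ _ _ _).mp hb)
  have := pySetLt_length_lt hbnd hlt'
  omega

-- CORE: A's incremental accepted-covers fold over a list with no later-⊂-earlier pair
-- computes exactly the minimal elements of that list.
theorem fold_min_aux (full : List (List Int × List Int))
    (hP : full.Pairwise (fun a b => pySetLt b.1 a.1 = false)) :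
    ∀ (S pre acc : List (List Int × List Int)), pre ++ S = full →
      acc = pre.filter (fun s => !(full.any (fun t => pySetLt t.1 s.1))) →
      (∀ t ∈ pre, ∃ u ∈ acc, u = t ∨ pySetLt u.1 t.1 = true) →
      S.foldl (fun adj c2 => if adj.any (fun t => pySetLt t.1 c2.1) then adj else adj ++ [c2]) acc
        = full.filter (fun s => !(full.any (fun t => pySetLt t.1 s.1))) := by
  intro S
  induction S with
  | nil =>
    intro pre acc hfull hacc _
    simp only [List.foldl_nil]
    rw [hacc, ← hfull]
    simp
  | cons s S' ih =>
    intro pre acc hfull hacc hdom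
    simp only [List.foldl_cons]
    cases hany : acc.any (fun t => pySetLt t.1 s.1) with
    | true =>
      -- some accepted cover is below s: s is not minimal in full, acc unchanged
      obtain ⟨u, hu, hus⟩ := List.any_eq_true.mp hany
      have humem : u ∈ full := by
        rw [← hfull]
        exact List.mem_append_left _ (List.mem_of_mem_filter (hacc ▸ hu))
      have hsfull : full.any (fun t => pySetLt t.1 s.1) = true :=
        List.any_eq_true.mpr ⟨u, humem, hus⟩
      refine ih (pre ++ [s]) acc (by simpa using hfull) ?_ ?_
      · rw [hacc, List.filter_append]
        simp [hsfull]
      · intro t ht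
        rcases List.mem_append.mp ht with h | h
        · exact hdom t h
        · have hts : t = s := by simpa using h
          exact ⟨u, hu, Or.inr (hts ▸ hus)⟩
    | false =>
      -- no accepted cover below s: s is minimal in full, s is accepted
      have hsmin : full.any (fun t => pySetLt t.1 s.1) = false := by
        by_contra hne
        have h1 : full.any (fun t => pySetLt t.1 s.1) = true := by
          cases hx : full.any (fun t => pySetLt t.1 s.1) with
          | false => exact absurd hx hne
          | true => rfl
        obtain ⟨t, htf, hts⟩ := List.any_eq_true.mp h1
        -- locate t in full = pre ++ s :: S'
        rcases List.mem_append.mp (hfull ▸ htf) with htp | hts'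
        · obtain ⟨u, hu, hcase⟩ := hdom t htp
          have hus : pySetLt u.1 s.1 = true := by
            rcases hcase with rfl | hut
            · exact hts
            · exact pySetLt_trans hut hts
          have : acc.any (fun t => pySetLt t.1 s.1) = true :=
            List.any_eq_true.mpr ⟨u, hu, hus⟩
          simp [this] at hany
        · rcases List.mem_cons.mp hts' with rfl | htS
          · simp [pySetLt_irrefl] at hts
          · -- t comes after s in full: Pairwise says pySetLt t.1 s.1 = false
            have hsuffix : (s :: S').Pairwise (fun a b => pySetLt b.1 a.1 = false) := by
              rw [← hfull] at hP
              exact hP.sublist (List.sublist_append_right _ _)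
            have := (List.pairwise_cons.mp hsuffix).1 t htS
            rw [this] at hts
            exact absurd hts (by simp)
      refine ih (pre ++ [s]) (acc ++ [s]) (by simpa using hfull) ?_ ?_
      · rw [hacc, List.filter_append]
        simp [hsmin]
      · intro t ht
        rcases List.mem_append.mp ht with h | h
        · obtain ⟨u, hu, hc⟩ := hdom t h
          exact ⟨u, List.mem_append_left _ hu, hc⟩
        · have hts : t = s := by simpa using h
          exact ⟨s, by simp, Or.inl hts.symm⟩

theorem fold_min (full : List (List Int × List Int))
    (hP : full.Pairwise (fun a b => pySetLt b.1 a.1 = false)) :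
    full.foldl (fun adj c2 => if adj.any (fun t => pySetLt t.1 c2.1) then adj else adj ++ [c2]) []
      = full.filter (fun s => !(full.any (fun t => pySetLt t.1 s.1))) :=
  fold_min_aux full hP full [] [] rfl rfl (by simp)

-- per-concept: A's inner accepted-covers computation equals B's covers helper
theorem inner_eq (cs : List (List Int × List Int))
    (hP : cs.Pairwise (fun a b => pySetLt b.1 a.1 = false)) (c1 : List Int × List Int) :
    cs.foldl (fun adj c2 =>
        if pySetLt c1.1 c2.1 then
          if adj.any (fun t => pySetLt t.1 c2.1) then adj else adj ++ [c2]
        else adj) []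
      = covers cs c1 := by
  have h := (PySem.List.foldl_if_eq_foldl_filter (fun c2 => pySetLt c1.1 c2.1)
      (fun adj c2 => if adj.any (fun t => pySetLt t.1 c2.1) then adj else adj ++ [c2]) cs []).trans
    (fold_min _ (hP.sublist List.filter_sublist))
  rw [h]
  simp only [covers, strictSub_eq]

theorem foldl_fun_congr {α β : Type} (f g : β → α → β) (l : List α) (init : β)
    (h : ∀ b a, f b a = g b a) : l.foldl f init = l.foldl g init := by
  induction l generalizing init with
  | nil => rfl
  | cons x xs ih => simp only [List.foldl_cons, h, ih]

-- the whole computation, with the sorted list abstracted out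
theorem main (cs : List (List Int × List Int))
    (hP : cs.Pairwise (fun a b => pySetLt b.1 a.1 = false)) :
    cs.foldl (fun edges c1 =>
        (cs.foldl (fun adj c2 =>
          if pySetLt c1.1 c2.1 then
            if adj.any (fun t => pySetLt t.1 c2.1) then adj else adj ++ [c2]
          else adj) []).foldl (fun e c2 => e ++ [(c1, c2)]) edges) []
      = cs.flatMap (fun c1 => (covers cs c1).map (fun s => (c1, s))) := by
  rw [← List.nil_append (cs.flatMap _), ← PySem.List.foldl_append_eq_flatMap]
  apply foldl_fun_congr
  intro edges c1
  rw [inner_eq _ hP c1, PySem.List.foldl_append_singleton_eq_map]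

-- ===== VERDICT (by name: the statement is the Claim_ definition above) =====
theorem lattice_spec : Claim_equal_lattice := by
  intro concepts _ hpre
  exact main _ (sorted_pairwise_notLt concepts hpre)
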